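-- pv_equiv track=rewrite | github.com/acenturyandabit/code2dia | code2dia/repositoryMiner.py | removeAfterHighestIndexOf
-- ===== SOURCE A (Python) =====
-- def removeAfterHighestIndexOf(item, context):
--     # # print (f"sliced for {item} from ")
--     # # print (context)
--     slicePoint = -1
--     for i in range (len(context)-1, 0,-1):
--         if context[i] == item:
--             slicePoint = i
--             break
--     if slicePoint > -1:
--         context = context [0:slicePoint]
--     if len(context) == 0:
--         context.append("")
--     # # print ("to")
--     # # print (context)
--     return context
-- ===== SOURCE B (Python) =====
-- def removeAfterHighestIndexOf(item, context):
--     indices = [i for i, x in enumerate(context) if i > 0 and x == item]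
--     slicePoint = max(indices) if indices else -1
--     if slicePoint > -1:
--         context = context[0:slicePoint]
--     if len(context) == 0:
--         context.append("")
--     return context
-- ===== Notes on version B (the rewrite author's own statement) =====
-- stated objective: alternative
-- what changed: Replaces A's backward short-circuit index loop with a single forward pass that collects all matching indices i>0 via a comprehension over enumerate and takes their max (or -1 if none) as the slice point.
import Mathlib
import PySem

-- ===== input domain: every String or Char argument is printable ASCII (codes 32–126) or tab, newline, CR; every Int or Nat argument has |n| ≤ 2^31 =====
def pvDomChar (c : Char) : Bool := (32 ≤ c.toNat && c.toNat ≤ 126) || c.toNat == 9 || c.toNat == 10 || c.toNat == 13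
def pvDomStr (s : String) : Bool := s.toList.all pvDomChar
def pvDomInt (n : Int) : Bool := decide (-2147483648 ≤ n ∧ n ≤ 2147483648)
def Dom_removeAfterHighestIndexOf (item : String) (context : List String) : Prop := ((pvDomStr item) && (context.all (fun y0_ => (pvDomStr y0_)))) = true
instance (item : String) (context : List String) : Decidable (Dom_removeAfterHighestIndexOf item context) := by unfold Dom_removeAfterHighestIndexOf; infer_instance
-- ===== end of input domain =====

-- B replaces A's backward short-circuit scan with a forward collect-then-max pass (objective: alternative).
-- Note: on an empty input list the Python A (and B) appends "" to the caller's list in place; the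
-- equivalence proved here is about the RETURN value only.

-- ===== PORT A =====
-- the 'for i in range(len(context)-1, 0, -1): if context[i] == item: slicePoint = i; break' loop
def pvAFind (item : String) (context : List String) : List Int → Int
  | [] => -1
  | i :: rest => if PySem.List.pyGetD context i "" = item then i else pvAFind item context rest

def removeAfterHighestIndexOf (item : String) (context : List String) : List String :=
  let slicePoint : Int := pvAFind item context (PySem.List.pyRange ((context.length : Int) - 1) 0 (-1))
  let context := if slicePoint > -1 then PySem.List.slice context (some 0) (some slicePoint) else context
  if context.length = 0 then context ++ [""] else context

-- ===== PORT B =====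
def removeAfterHighestIndexOf_alt (item : String) (context : List String) : List String :=
  let indices : List Int :=
    (PySem.List.enumerate context 0).filterMap
      (fun p => if p.1 > 0 ∧ p.2 = item then some p.1 else none)
  let slicePoint : Int := (PySem.List.max? indices (fun x => x)).getD (-1)
  let context := if slicePoint > -1 then PySem.List.slice context (some 0) (some slicePoint) else context
  if context.length = 0 then context ++ [""] else context

-- ===== PRECONDITION & SPEC =====
def Spec_removeAfterHighestIndexOf (item : String) (context : List String) (out : List String) : Prop := out = removeAfterHighestIndexOf_alt item context
instance (item : String) (context : List String) (out : List String) : Decidable (Spec_removeAfterHighestIndexOf item context out) := by unfold Spec_removeAfterHighestIndexOf; infer_instance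

-- ===== CLAIM (what is proved, stated in full; the proofs are below) =====
def Claim_equal_removeAfterHighestIndexOf : Prop := ∀ (item : String) (context : List String), Dom_removeAfterHighestIndexOf item context → Spec_removeAfterHighestIndexOf item context (removeAfterHighestIndexOf item context)

-- ===== LEMMAS AND PROOFS =====

-- A's loop returns the first matching index in its traversal list (or -1)
theorem pvAFind_eq_headD (item : String) (ctx : List String) (l : List Int) :
    pvAFind item ctx l =
      ((l.filter (fun i => decide (PySem.List.pyGetD ctx i "" = item))).headD (-1)) := by
  induction l with
  | nil => rfl
  | cons i rest ih =>
      by_cases h : PySem.List.pyGetD ctx i "" = item <;>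
        simp [pvAFind, h, ih]

-- foldl max over a strictly ascending tail computes the last element
theorem pv_foldl_max_sorted (t : List Int) : ∀ (x : Int), (x :: t).Pairwise (· < ·) →
    t.foldl max x = (x :: t).getLast (by simp) := by
  induction t with
  | nil => intro x _; simp
  | cons y t' ih =>
      intro x hp
      have hxy : x < y := (List.pairwise_cons.mp hp).1 y (by simp)
      have hp' : (y :: t').Pairwise (· < ·) := (List.pairwise_cons.mp hp).2
      have : max x y = y := max_eq_right (le_of_lt hxy)
      simp only [List.foldl_cons, this]
      rw [ih y hp']
      simp

-- Python max of a strictly ascending list is its last element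
theorem pv_max?_sorted (l : List Int) (hp : l.Pairwise (· < ·)) :
    (PySem.List.max? l (fun x => x)).getD (-1) = l.getLastD (-1) := by
  cases l with
  | nil => simp [PySem.List.max?]
  | cons x t =>
      rw [PySem.List.max?_id_cons]
      rw [pv_foldl_max_sorted t x hp]
      simp [List.getLastD_eq_getLast?, List.getLast?_eq_some_getLast]

theorem removeAfterHighestIndexOf_eq (item : String) (context : List String) :
    removeAfterHighestIndexOf item context = removeAfterHighestIndexOf_alt item context := by
  unfold removeAfterHighestIndexOf removeAfterHighestIndexOf_alt
  have hsp :
      pvAFind item context (PySem.List.pyRange ((context.length : Int) - 1) 0 (-1)) =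
      (PySem.List.max? ((PySem.List.enumerate context 0).filterMap
          (fun p => if p.1 > 0 ∧ p.2 = item then some p.1 else none)) (fun x => x)).getD (-1) := by
    set P : Int → Bool := fun i => decide (PySem.List.pyGetD context i "" = item) with hP
    have hA : pvAFind item context (PySem.List.pyRange ((context.length : Int) - 1) 0 (-1)) =
        ((PySem.List.pyRange 1 (context.length : Int) 1).filter P).getLastD (-1) := by
      rw [pvAFind_eq_headD]
      rw [PySem.List.pyRange_neg_one_eq_reverse]
      rw [show ((0:Int)+1) = 1 from rfl,
          show ((context.length : Int) - 1 + 1) = (context.length : Int) by ring]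
      rw [List.filter_reverse]
      simp [List.head?_reverse, List.getLastD_eq_getLast?, hP]
    have hInd : (PySem.List.enumerate context 0).filterMap
          (fun p => if p.1 > 0 ∧ p.2 = item then some p.1 else none) =
        (PySem.List.pyRange 1 (context.length : Int) 1).filter P := by
      rw [PySem.List.enumerate_eq_map_pyRange (d := "")]
      rw [List.filterMap_map]
      have hfil : ∀ (l : List Int),
          l.filterMap (fun j => if j > 0 ∧ PySem.List.pyGetD context j "" = item then some j else none)
            = l.filter (fun j => decide (j > 0) && P j) := by
        intro l
        induction l with
        | nil => rfl
        | cons j t ih =>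
            by_cases h1 : j > 0 <;> by_cases h2 : PySem.List.pyGetD context j "" = item <;>
              simp [h1, h2, ih, hP]
      have hcomp : ((fun p : Int × String => if p.1 > 0 ∧ p.2 = item then some p.1 else none)
            ∘ (fun j => (j, PySem.List.pyGetD context j "")))
          = (fun j : Int => if j > 0 ∧ PySem.List.pyGetD context j "" = item then some j else none) := by
        funext j; simp [Function.comp]
      rw [hcomp, hfil]
      rw [show PySem.List.len context = (context.length : Int) by simp [PySem.List.len]]
      by_cases hn : (1 : Int) ≤ (context.length : Int)
      · rw [PySem.List.pyRange_one_append 0 1 (context.length : Int) (by omega) hn]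
        rw [List.filter_append]
        have h01 : PySem.List.pyRange 0 1 1 = [(0 : Int)] := PySem.List.pyRange_one_singleton 0
        rw [h01]
        have : ∀ j ∈ PySem.List.pyRange 1 (context.length : Int) 1,
            (decide (j > 0) && P j) = P j := by
          intro j hj
          have := (PySem.List.mem_pyRange_one).mp hj
          simp [show (0:Int) < j by omega]
        rw [List.filter_congr this]
        simp
      · have h0 : PySem.List.pyRange 0 (context.length : Int) 1 = [] :=
          PySem.List.pyRange_one_eq_nil (by omega)
        have h1 : PySem.List.pyRange 1 (context.length : Int) 1 = [] :=
          PySem.List.pyRange_one_eq_nil (by omega)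
        rw [h0, h1]
        simp
    rw [hA, hInd, pv_max?_sorted]
    exact (PySem.List.pairwise_lt_pyRange_one 1 (context.length : Int)).filter _
  rw [hsp]

-- ===== VERDICT (by name: the statement is the Claim_ definition above) =====
theorem removeAfterHighestIndexOf_spec : Claim_equal_removeAfterHighestIndexOf := by
  intro item context _
  exact removeAfterHighestIndexOf_eq item context
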